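-- pv_equiv track=rewrite | github.com/Softwaresr/LeetCode-Solutions | 1967-longest-substring-of-all-vowels-in-order/1967-longest-substring-of-all-vowels-in-order.py | longestBeautifulSubstring
-- ===== SOURCE A (Python) =====
-- def longestBeautifulSubstring(word: str) -> int:
--     vowels = ['a', 'e', 'i', 'o', 'u']
--     i = 0
--     curr_idx = 0
--     count = 0
--     ans = 0
--     while i < len(word):
--         if word[i] == vowels[curr_idx]:
--             count += 1
--         elif (i > 0
--             and word[i - 1] == vowels[curr_idx]
--             and curr_idx < len(vowels) - 1
--             and word[i] == vowels[curr_idx + 1]):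
--             curr_idx += 1
--             count += 1
--         else:
--             if curr_idx == len(vowels) - 1:
--                 ans = max(ans, count)
--             curr_idx = 0
--             count = 0
--             if word[i] == vowels[curr_idx]:
--                 count += 1
--         i += 1
--
--     if curr_idx == len(vowels) - 1:
--         ans = max(ans, count)
--
--     return ans
-- ===== SOURCE B (Python) =====
-- def longestBeautifulSubstring(word: str) -> int:
--     # stage 1: run-length encode the string into (char, count) runs
--     runs = []
--     i, n = 0, len(word)
--     while i < n:
--         j = i + 1
--         while j < n and word[j] == word[i]:
--             j += 1
--         runs.append((word[i], j - i))
--         i = j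
--     # stage 2: a beautiful substring is exactly five consecutive runs
--     # spelling 'aeiou'; slide a 5-run window and take the largest total
--     ans = 0
--     for k in range(len(runs) - 4):
--         if (runs[k][0], runs[k+1][0], runs[k+2][0], runs[k+3][0], runs[k+4][0]) == ('a', 'e', 'i', 'o', 'u'):
--             ans = max(ans, runs[k][1] + runs[k+1][1] + runs[k+2][1] + runs[k+3][1] + runs[k+4][1])
--     return ans
-- ===== Notes on version B (the rewrite author's own statement) =====
-- stated objective: alternative
-- what changed: A's single-pass state machine (an index into the vowel list plus a look-back at word[i-1]) is replaced by a two-stage algorithm: first run-length-encode the string into (char, count) runs, then slide a window of five consecutive runs and take the largest total over windows whose run characters are the five vowels in order.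
import Mathlib
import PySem

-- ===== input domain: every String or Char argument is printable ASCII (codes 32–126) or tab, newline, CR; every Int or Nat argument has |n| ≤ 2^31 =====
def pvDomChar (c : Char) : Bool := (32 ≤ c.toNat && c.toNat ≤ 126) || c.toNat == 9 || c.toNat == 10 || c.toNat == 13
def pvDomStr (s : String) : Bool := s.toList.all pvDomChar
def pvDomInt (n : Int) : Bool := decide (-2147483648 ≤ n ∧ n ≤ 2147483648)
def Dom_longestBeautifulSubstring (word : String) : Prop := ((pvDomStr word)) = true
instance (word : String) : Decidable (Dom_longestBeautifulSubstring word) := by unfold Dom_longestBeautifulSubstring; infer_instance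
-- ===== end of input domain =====

-- B replaces A's one-pass next-expected-vowel state machine by a two-stage
-- algorithm: run-length encode the string, then slide a five-run window over
-- the runs looking for windows whose run characters are the five vowels in order
-- (alternative decomposition, same O(n) cost).

-- ===== PORT A =====
def pvVowels : List Char := ['a', 'e', 'i', 'o', 'u']

-- A's while loop: state (curr_idx, count, ans); word[i-1] is carried as `prevc`.
def lbsLoop : List Char → Option Char → Nat → Nat → Nat → Nat × Nat × Nat
  | [], _, curr_idx, count, ans => (curr_idx, count, ans)
  | c :: rest, prevc, curr_idx, count, ans =>
    if c = pvVowels.getD curr_idx ' ' then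
      lbsLoop rest (some c) curr_idx (count + 1) ans
    else if prevc = some (pvVowels.getD curr_idx ' ') ∧ curr_idx < 4 ∧
            c = pvVowels.getD (curr_idx + 1) ' ' then
      lbsLoop rest (some c) (curr_idx + 1) (count + 1) ans
    else
      lbsLoop rest (some c) 0 (if c = 'a' then 1 else 0)
        (if curr_idx = 4 then max ans count else ans)

def longestBeautifulSubstring (word : String) : Int :=
  let s := lbsLoop word.toList none 0 0 0
  ((if s.1 = 4 then max s.2.2 s.2.1 else s.2.2 : Nat) : Int)

-- ===== PORT B =====
-- stage 1 of Source B: run-length encoding; the inner `while j < n and word[j] == word[i]`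
-- is the takeWhile count, advancing i to j is the dropWhile.
def lbsRle : List Char → List (Char × Nat)
  | [] => []
  | c :: rest =>
    (c, (rest.takeWhile (· == c)).length + 1) :: lbsRle (rest.dropWhile (· == c))
termination_by l => l.length
decreasing_by
  simp only [List.length_cons]
  exact Nat.lt_succ_of_le (List.length_dropWhile_le _ _)

-- stage 2 of Source B: slide a window of five consecutive runs over the run list.
def lbsWin : List (Char × Nat) → Nat → Nat
  | p1 :: p2 :: p3 :: p4 :: p5 :: rest, ans =>
    lbsWin (p2 :: p3 :: p4 :: p5 :: rest)
      (if p1.1 = 'a' ∧ p2.1 = 'e' ∧ p3.1 = 'i' ∧ p4.1 = 'o' ∧ p5.1 = 'u'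
       then max ans (p1.2 + p2.2 + p3.2 + p4.2 + p5.2) else ans)
  | _, ans => ans

def longestBeautifulSubstring_alt (word : String) : Int :=
  ((lbsWin (lbsRle word.toList) 0 : Nat) : Int)

-- ===== PRECONDITION & SPEC =====
def Spec_longestBeautifulSubstring (word : String) (out : Int) : Prop := out = longestBeautifulSubstring_alt word
instance (word : String) (out : Int) : Decidable (Spec_longestBeautifulSubstring word out) := by unfold Spec_longestBeautifulSubstring; infer_instance

-- ===== CLAIM (what is proved, stated in full; the proofs are below) =====
def Claim_equal_longestBeautifulSubstring : Prop := ∀ (word : String), Dom_longestBeautifulSubstring word → Spec_longestBeautifulSubstring word (longestBeautifulSubstring word)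

-- ===== LEMMAS AND PROOFS =====

-- rank of a vowel in 'aeiou', -1 for any other character (proof-side only)
def lbsRank (c : Char) : Int :=
  if c = 'a' then 0 else if c = 'e' then 1 else if c = 'i' then 2
  else if c = 'o' then 3 else if c = 'u' then 4 else -1

def optRank : Option Char → Int
  | none => -1
  | some c => lbsRank c

-- proof-side middle loop: the non-decreasing-run + distinct-count char scan;
-- state (ans, length, distinct, prev).
def midLoop : List Char → Nat → Nat → Nat → Int → Nat
  | [], ans, _, _, _ => ans
  | c :: rest, ans, length, distinct, prev =>
    let r := lbsRank c
    if r < 0 then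
      midLoop rest ans 0 0 r
    else
      let s := if length = 0 ∨ r < prev then (1, 1)
               else if r = prev then (length + 1, distinct)
               else (length + 1, distinct + 1)
      midLoop rest (if s.2 = 5 then max ans s.1 else ans) s.1 s.2 r

-- coupling invariant between A's loop state and midLoop's state
def lbsInv (prevc : Option Char) (ci ct ansA ansB len dst : Nat) (prev : Int) : Prop :=
  prev = optRank prevc ∧
  ( (1 ≤ ct ∧ len = ct ∧ dst = ci + 1 ∧ prev = (ci : Int) ∧ ci ≤ 4 ∧
       ansB = max ansA (if ci = 4 then ct else 0))
  ∨ (ct = 0 ∧ ci = 0 ∧ ansB = ansA ∧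
       ((len = 0 ∧ dst = 0 ∧ prev = -1) ∨
        (1 ≤ len ∧ 1 ≤ dst ∧ (dst : Int) ≤ prev ∧ 1 ≤ prev ∧ prev ≤ 4))) )

lemma lbsRank_range (c : Char) : -1 ≤ lbsRank c ∧ lbsRank c ≤ 4 := by
  unfold lbsRank; split_ifs <;> first | exact (‹False›).elim | omega

lemma vowelAt_iff (c : Char) (k : Nat) (hk : k ≤ 4) :
    (c = pvVowels.getD k ' ') ↔ lbsRank c = (k : Int) := by
  interval_cases k <;>
    simp only [pvVowels, List.getD, lbsRank, Nat.cast_ofNat] <;>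
    constructor <;> intro h <;> split_ifs at * <;> simp_all

lemma optRank_eq (p : Option Char) (k : Nat) (hk : k ≤ 4) :
    (p = some (pvVowels.getD k ' ')) ↔ optRank p = (k : Int) := by
  cases p with
  | none => simp only [optRank]; constructor <;> intro h <;> [exact absurd h (by simp); omega]
  | some c => simp only [optRank, Option.some.injEq]; exact vowelAt_iff c k hk

lemma midLoop_cons (c : Char) (rest : List Char) (ans length distinct : Nat) (prev : Int) :
    midLoop (c :: rest) ans length distinct prev =
      if lbsRank c < 0 then midLoop rest ans 0 0 (lbsRank c)
      else if length = 0 ∨ lbsRank c < prev then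
        midLoop rest ans 1 1 (lbsRank c)
      else if lbsRank c = prev then
        midLoop rest (if distinct = 5 then max ans (length + 1) else ans) (length + 1) distinct (lbsRank c)
      else
        midLoop rest (if distinct + 1 = 5 then max ans (length + 1) else ans) (length + 1) (distinct + 1) (lbsRank c) := by
  simp only [midLoop]
  split_ifs <;> simp_all

lemma rank0_iff (c : Char) : (c = 'a') ↔ lbsRank c = 0 := by
  unfold lbsRank; split_ifs <;> simp_all

lemma loop_eq (rest : List Char) : ∀ (prevc : Option Char) (ci ct ansA ansB len dst : Nat)
    (prev : Int), lbsInv prevc ci ct ansA ansB len dst prev →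
    (if (lbsLoop rest prevc ci ct ansA).1 = 4
      then max (lbsLoop rest prevc ci ct ansA).2.2 (lbsLoop rest prevc ci ct ansA).2.1
      else (lbsLoop rest prevc ci ct ansA).2.2)
      = midLoop rest ansB len dst prev := by
  induction rest with
  | nil =>
    intro prevc ci ct ansA ansB len dst prev h
    obtain ⟨hprev, hc⟩ := h
    simp only [lbsLoop, midLoop]
    rcases hc with ⟨hct, hlen, hdst, hpc, hci, hans⟩ | ⟨hct, hci, hans, hsub⟩ <;>
      split_ifs at * <;> omega
  | cons c rest ih =>
    intro prevc ci ct ansA ansB len dst prev h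
    obtain ⟨hprev, hc⟩ := h
    have hr := lbsRank_range c
    rw [midLoop_cons]
    simp only [lbsLoop]
    rcases hc with ⟨hct, hlen, hdst, hpc, hci, hans⟩ | ⟨hct, hci, hans, hsub⟩
    · -- CASE 1: A is inside a chain run; midLoop's run coincides with it
      by_cases h1 : lbsRank c = (ci : Int)
      · rw [if_pos (show c = pvVowels.getD ci ' ' from (vowelAt_iff c ci hci).mpr h1),
            if_neg (show ¬ lbsRank c < 0 by omega),
            if_neg (show ¬ (len = 0 ∨ lbsRank c < prev) by rintro (h | h) <;> omega),
            if_pos (show lbsRank c = prev by omega)]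
        apply ih
        refine ⟨rfl, Or.inl ⟨by omega, by omega, hdst, by omega, hci, ?_⟩⟩
        split_ifs at hans ⊢ <;> first | exact (‹False›).elim | omega
      · by_cases h2 : lbsRank c = (ci : Int) + 1 ∧ ci < 4
        · obtain ⟨h2r, h2lt⟩ := h2
          rw [if_neg (show ¬ c = pvVowels.getD ci ' ' from
                fun hh => h1 ((vowelAt_iff c ci hci).mp hh)),
              if_pos (show prevc = some (pvVowels.getD ci ' ') ∧ ci < 4 ∧
                  c = pvVowels.getD (ci + 1) ' ' from
                ⟨(optRank_eq prevc ci hci).mpr (by omega), h2lt,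
                  (vowelAt_iff c (ci + 1) (by omega)).mpr (by push_cast; omega)⟩),
              if_neg (show ¬ lbsRank c < 0 by omega),
              if_neg (show ¬ (len = 0 ∨ lbsRank c < prev) by rintro (h | h) <;> omega),
              if_neg (show ¬ lbsRank c = prev by omega)]
          apply ih
          refine ⟨rfl, Or.inl ⟨by omega, by omega, by omega, by push_cast; omega, by omega, ?_⟩⟩
          split_ifs at hans ⊢ <;> first | exact (‹False›).elim | omega
        · rw [if_neg (show ¬ c = pvVowels.getD ci ' ' from
                fun hh => h1 ((vowelAt_iff c ci hci).mp hh)),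
              if_neg (show ¬ (prevc = some (pvVowels.getD ci ' ') ∧ ci < 4 ∧
                  c = pvVowels.getD (ci + 1) ' ') by
                rintro ⟨hp, hlt, hcv⟩
                have := (vowelAt_iff c (ci + 1) (by omega)).mp hcv
                exact h2 ⟨by push_cast at this; omega, hlt⟩)]
          by_cases hv : lbsRank c < 0
          · rw [if_neg (show ¬ c = 'a' from
                  fun ha => by have := (rank0_iff c).mp ha; omega),
                if_pos hv]
            apply ih
            refine ⟨rfl, Or.inr ⟨rfl, rfl, ?_, Or.inl ⟨rfl, rfl, by omega⟩⟩⟩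
            split_ifs at hans ⊢ <;> first | exact (‹False›).elim | omega
          · by_cases hz : lbsRank c = 0
            · rw [if_pos (show c = 'a' from (rank0_iff c).mpr hz),
                  if_neg hv,
                  if_pos (show len = 0 ∨ lbsRank c < prev from Or.inr (by omega))]
              apply ih
              refine ⟨rfl, Or.inl ⟨by omega, rfl, rfl, by omega, by omega, ?_⟩⟩
              split_ifs at hans ⊢ <;> first | exact (‹False›).elim | omega
            · rw [if_neg (show ¬ c = 'a' from
                    fun ha => hz ((rank0_iff c).mp ha)),
                  if_neg hv]
              by_cases hlt2 : lbsRank c < prev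
              · rw [if_pos (show len = 0 ∨ lbsRank c < prev from Or.inr hlt2)]
                apply ih
                refine ⟨rfl, Or.inr ⟨rfl, rfl, ?_, Or.inr ⟨le_refl 1, le_refl 1,
                  by omega, by omega, by omega⟩⟩⟩
                split_ifs at hans ⊢ <;> first | exact (‹False›).elim | omega
              · rw [if_neg (show ¬ (len = 0 ∨ lbsRank c < prev) by rintro (h | h) <;> omega),
                    if_neg (show ¬ lbsRank c = prev by omega),
                    if_neg (show ¬ dst + 1 = 5 by omega)]
                apply ih
                refine ⟨rfl, Or.inr ⟨rfl, rfl, ?_, Or.inr ⟨by omega, by omega,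
                  by omega, by omega, by omega⟩⟩⟩
                split_ifs at hans ⊢ <;> first | exact (‹False›).elim | omega
    · -- CASE 2: A's chain is empty (curr_idx = 0, count = 0)
      subst hct hci hans
      by_cases hz : lbsRank c = 0
      · rw [if_pos (show c = pvVowels.getD 0 ' ' from (vowelAt_iff c 0 (by omega)).mpr (by omega)),
            if_neg (show ¬ lbsRank c < 0 by omega),
            if_pos (show len = 0 ∨ lbsRank c < prev by
              rcases hsub with ⟨h, -, -⟩ | ⟨-, -, -, h, -⟩ <;> omega)]
        apply ih
        refine ⟨rfl, Or.inl ⟨by omega, rfl, rfl, by omega, by omega, ?_⟩⟩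
        split_ifs <;> first | exact (‹False›).elim | omega
      · rw [if_neg (show ¬ c = pvVowels.getD 0 ' ' from
              fun ha => hz (by exact_mod_cast (vowelAt_iff c 0 (by omega)).mp ha)),
            if_neg (show ¬ (prevc = some (pvVowels.getD 0 ' ') ∧ (0 : Nat) < 4 ∧
                c = pvVowels.getD (0 + 1) ' ') by
              rintro ⟨hp, -, -⟩
              have := (optRank_eq prevc 0 (by omega)).mp hp
              rcases hsub with ⟨-, -, h⟩ | ⟨-, -, -, h, -⟩ <;> omega),
            if_neg (show ¬ c = 'a' from fun ha => hz ((rank0_iff c).mp ha)),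
            if_neg (show ¬ (0 : Nat) = 4 by omega)]
        by_cases hv : lbsRank c < 0
        · rw [if_pos hv]
          apply ih
          exact ⟨rfl, Or.inr ⟨rfl, rfl, rfl, Or.inl ⟨rfl, rfl, by omega⟩⟩⟩
        · by_cases hb : len = 0 ∨ lbsRank c < prev
          · rw [if_neg hv, if_pos hb]
            apply ih
            exact ⟨rfl, Or.inr ⟨rfl, rfl, rfl, Or.inr ⟨le_refl 1, le_refl 1,
              by omega, by omega, by omega⟩⟩⟩
          · rcases hsub with ⟨hl0, -, -⟩ | ⟨hl, hd, hdp, hp1, hp4⟩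
            · exact absurd (Or.inl hl0) hb
            · by_cases he : lbsRank c = prev
              · rw [if_neg hv, if_neg hb, if_pos he, if_neg (show ¬ dst = 5 by omega)]
                apply ih
                exact ⟨rfl, Or.inr ⟨rfl, rfl, rfl, Or.inr ⟨by omega, hd,
                  by omega, by omega, by omega⟩⟩⟩
              · rw [if_neg hv, if_neg hb, if_neg he, if_neg (show ¬ dst + 1 = 5 by omega)]
                apply ih
                exact ⟨rfl, Or.inr ⟨rfl, rfl, rfl, Or.inr ⟨by omega, by omega,
                  by omega, by omega, by omega⟩⟩⟩

lemma A_eq_mid (word : String) :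
    longestBeautifulSubstring word = ((midLoop word.toList 0 0 0 (-1) : Nat) : Int) := by
  unfold longestBeautifulSubstring
  have h := loop_eq word.toList none 0 0 0 0 0 0 (-1)
    (by unfold lbsInv optRank; exact ⟨rfl, Or.inr ⟨rfl, rfl, rfl, Or.inl ⟨rfl, rfl, rfl⟩⟩⟩)
  simp only [← h]

-- ## basic rank facts

lemma rank_neg_eq (c : Char) (h : lbsRank c < 0) : lbsRank c = -1 := by
  unfold lbsRank at h ⊢; split_ifs at h ⊢ <;> omega

lemma rank_inj (c d : Char) (h0 : 0 ≤ lbsRank c) (h : lbsRank c = lbsRank d) : c = d := by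
  unfold lbsRank at h0 h; split_ifs at h0 h <;> simp_all

-- ## lbsWin facts

lemma winLoop_short (M : List (Char × Nat)) (ans : Nat) (h : M.length < 5) :
    lbsWin M ans = ans := by
  rcases M with _ | ⟨a, _ | ⟨b, _ | ⟨c, _ | ⟨d, _ | ⟨e, r⟩⟩⟩⟩⟩ <;>
    first | rfl | (exfalso; simp at h; omega)

lemma exists4 (M : List (Char × Nat)) (h : 4 ≤ M.length) :
    ∃ a b c d r, M = a :: b :: c :: d :: r := by
  rcases M with _ | ⟨a, _ | ⟨b, _ | ⟨c, _ | ⟨d, r⟩⟩⟩⟩ <;>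
    first | exact ⟨_, _, _, _, _, rfl⟩ | (exfalso; simp at h)

def lbsBad (M : List (Char × Nat)) : Prop :=
  ∀ x1 x2 x3 x4 x5 rest, M = x1 :: x2 :: x3 :: x4 :: x5 :: rest →
    ¬(x1.1 = 'a' ∧ x2.1 = 'e' ∧ x3.1 = 'i' ∧ x4.1 = 'o' ∧ x5.1 = 'u')

lemma winLoop_skip : ∀ (S L : List (Char × Nat)) (ans : Nat),
    (∀ j, j < S.length → lbsBad (List.drop j (S ++ L))) →
    lbsWin (S ++ L) ans = lbsWin L ans := by
  intro S
  induction S with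
  | nil => intro L ans _; rfl
  | cons s S ih =>
    intro L ans h
    by_cases h5 : (s :: (S ++ L)).length < 5
    · rw [List.cons_append, winLoop_short _ _ (by simpa using h5),
          winLoop_short L ans (by simp at h5; omega)]
    · have h4 : 4 ≤ (S ++ L).length := by simp at h5 ⊢; omega
      obtain ⟨a, b, c, d, r, hM⟩ := exists4 _ h4
      have hbad := h 0 (by simp)
      rw [List.drop_zero, List.cons_append, hM] at hbad
      rw [List.cons_append, hM]
      have hcond := hbad s a b c d r rfl
      rw [show lbsWin (s :: a :: b :: c :: d :: r) ans =
            lbsWin (a :: b :: c :: d :: r)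
              (if s.1 = 'a' ∧ a.1 = 'e' ∧ b.1 = 'i' ∧ c.1 = 'o' ∧ d.1 = 'u'
               then max ans (s.2 + a.2 + b.2 + c.2 + d.2) else ans) from rfl,
          if_neg hcond, ← hM]
      apply ih
      intro j hj
      have := h (j + 1) (by simpa using Nat.succ_lt_succ hj)
      rwa [List.cons_append, List.drop_succ_cons] at this

lemma winLoop_drop_mis (S L : List (Char × Nat)) (ans : Nat)
    (hA : ∀ j (hj : j < S.length), 1 ≤ j → (S[j]).1 ≠ 'a')
    (hm : ∃ i, i < 5 ∧ ∀ x, (S ++ L)[i]? = some x → x.1 ≠ pvVowels.getD i ' ') :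
    lbsWin (S ++ L) ans = lbsWin L ans := by
  apply winLoop_skip
  intro j hj x1 x2 x3 x4 x5 rest hEq
  rintro ⟨e1, e2, e3, e4, e5⟩
  rcases Nat.eq_zero_or_pos j with hj0 | hj1
  · subst hj0
    rw [List.drop_zero] at hEq
    obtain ⟨i, hi5, hmis⟩ := hm
    interval_cases i <;> simp only [pvVowels, List.getD] at hmis
    · exact hmis x1 (by rw [hEq]; rfl) e1
    · exact hmis x2 (by rw [hEq]; rfl) e2
    · exact hmis x3 (by rw [hEq]; rfl) e3
    · exact hmis x4 (by rw [hEq]; rfl) e4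
    · exact hmis x5 (by rw [hEq]; rfl) e5
  · have hx1 : (S ++ L)[j]? = some x1 := by
      have := congrArg (fun l => l[0]?) hEq
      simpa [List.getElem?_drop] using this
    rw [List.getElem?_append_left hj, List.getElem?_eq_getElem hj] at hx1
    have hs : S[j] = x1 := Option.some_inj.mp hx1
    exact hA j hj hj1 (by rw [hs]; exact e1)

lemma winLoop_drop_notA (S L : List (Char × Nat)) (ans : Nat)
    (h : ∀ p ∈ S, p.1 ≠ 'a') :
    lbsWin (S ++ L) ans = lbsWin L ans := by
  apply winLoop_skip
  intro j hj x1 x2 x3 x4 x5 rest hEq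
  rintro ⟨e1, -, -, -, -⟩
  have hx1 : (S ++ L)[j]? = some x1 := by
    have := congrArg (fun l => l[0]?) hEq
    simpa [List.getElem?_drop] using this
  rw [List.getElem?_append_left hj, List.getElem?_eq_getElem hj] at hx1
  have hs : S[j] = x1 := Option.some_inj.mp hx1
  exact h _ (S.getElem_mem hj) (by rw [hs]; exact e1)

lemma winLoop_gdrop (k1 k2 k3 k4 k5 : Nat) (L : List (Char × Nat)) (ans : Nat)
    (h : k1 + k2 + k3 + k4 + k5 ≤ ans) :
    lbsWin ([('a',k1),('e',k2),('i',k3),('o',k4),('u',k5)] ++ L) ans = lbsWin L ans := by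
  have h1 : lbsWin ([('a',k1),('e',k2),('i',k3),('o',k4),('u',k5)] ++ L) ans
      = lbsWin ([('e',k2),('i',k3),('o',k4),('u',k5)] ++ L) (max ans (k1 + k2 + k3 + k4 + k5)) := by
    simp [lbsWin]
  rw [h1, Nat.max_eq_left h]
  exact winLoop_drop_notA [('e',k2),('i',k3),('o',k4),('u',k5)] L ans
    (by intro p hp; fin_cases hp <;> simp)

lemma winLoop_absorb (k1 k2 k3 k4 k5 : Nat) (L : List (Char × Nat)) (ans : Nat) :
    lbsWin ([('a',k1),('e',k2),('i',k3),('o',k4),('u',k5)] ++ L) (max ans (k1 + k2 + k3 + k4 + k5))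
      = lbsWin ([('a',k1),('e',k2),('i',k3),('o',k4),('u',k5)] ++ L) ans := by
  have h1 : ∀ acc, lbsWin ([('a',k1),('e',k2),('i',k3),('o',k4),('u',k5)] ++ L) acc
      = lbsWin ([('e',k2),('i',k3),('o',k4),('u',k5)] ++ L) (max acc (k1 + k2 + k3 + k4 + k5)) := by
    intro acc; simp [lbsWin]
  rw [h1, h1]
  congr 1
  omega

-- ## rle facts

lemma takeWhile_eq_replicate (c : Char) (l : List Char) :
    l.takeWhile (· == c) = List.replicate (l.takeWhile (· == c)).length c := by
  apply List.eq_replicate_of_mem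
  intro b hb
  simpa using List.mem_takeWhile_imp hb

lemma dropWhile_head_ne (c : Char) (l : List Char) (d : Char)
    (h : (l.dropWhile (· == c)).head? = some d) : d ≠ c := by
  induction l with
  | nil => simp [List.dropWhile] at h
  | cons a l ih =>
    rw [List.dropWhile_cons] at h
    by_cases hac : (a == c) = true
    · rw [if_pos hac] at h; exact ih h
    · rw [if_neg hac] at h
      simp only [List.head?] at h
      injection h with h
      subst h
      simpa using hac

lemma lbsRle_cons (c : Char) (rest : List Char) :
    lbsRle (c :: rest)
      = (c, (rest.takeWhile (· == c)).length + 1) :: lbsRle (rest.dropWhile (· == c)) := by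
  simp [lbsRle]

-- ## midLoop over a run of equal characters

lemma midLoop_rep (c : Char) (hr : 0 ≤ lbsRank c) :
    ∀ (k : Nat) (rest : List Char) (ans len dst : Nat), 1 ≤ len → (dst = 5 → len ≤ ans) →
    midLoop (List.replicate k c ++ rest) ans len dst (lbsRank c)
      = midLoop rest (if dst = 5 then max ans (len + k) else ans) (len + k) dst (lbsRank c) := by
  intro k
  induction k with
  | zero =>
    intro rest ans len dst h1 h5
    simp only [List.replicate_zero, List.nil_append, Nat.add_zero]
    split_ifs with h
    · rw [Nat.max_eq_left (h5 h)]
    · rfl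
  | succ k ih =>
    intro rest ans len dst h1 h5
    rw [List.replicate_succ, List.cons_append, midLoop_cons,
        if_neg (by omega), if_neg (by rintro (h | h) <;> omega), if_pos rfl]
    rw [ih rest _ (len + 1) dst (by omega)
        (fun h => by split_ifs <;> omega)]
    have hlen : len + 1 + k = len + (k + 1) := by omega
    rw [hlen]
    congr 1
    split_ifs <;> omega

lemma midLoop_rep_nv (c : Char) (hr : lbsRank c < 0) :
    ∀ (k : Nat) (rest : List Char) (ans len dst : Nat) (prev : Int),
    midLoop (List.replicate (k + 1) c ++ rest) ans len dst prev
      = midLoop rest ans 0 0 (lbsRank c) := by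
  intro k
  induction k with
  | zero =>
    intro rest ans len dst prev
    rw [show List.replicate 1 c ++ rest = c :: rest from rfl, midLoop_cons, if_pos hr]
  | succ k ih =>
    intro rest ans len dst prev
    rw [List.replicate_succ, List.cons_append, midLoop_cons, if_pos hr]
    exact ih rest ans 0 0 (lbsRank c)

-- ## the streak invariant between midLoop's state and the pending-window runs S

def lbsInvS (S : List (Char × Nat)) (len dst : Nat) (prev : Int) (ans : Nat) : Prop :=
  (S = [] ∧ len = 0 ∧ dst = 0 ∧ prev = -1)
  ∨ (∃ ks : List Nat, S = List.zipWith Prod.mk (pvVowels.take dst) ks ∧ ks.length = dst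
      ∧ 1 ≤ dst ∧ dst ≤ 4 ∧ len = ks.sum ∧ prev = (dst : Int) - 1 ∧ 1 ≤ len)
  ∨ (∃ k1 k2 k3 k4 k5 : Nat, S = [('a',k1),('e',k2),('i',k3),('o',k4),('u',k5)]
      ∧ dst = 5 ∧ prev = 4 ∧ len = k1+k2+k3+k4+k5 ∧ 1 ≤ len ∧ len ≤ ans)
  ∨ (S ≠ [] ∧ dst = S.length ∧ dst ≤ 4 ∧ len = (S.map Prod.snd).sum ∧ 1 ≤ len
      ∧ (dst : Int) ≤ prev ∧ prev ≤ 4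
      ∧ (∀ j (hj : j < S.length), 1 ≤ j → (S[j]).1 ≠ 'a')
      ∧ (∃ i, ∃ _ : i < S.length, (S[i]).1 ≠ pvVowels.getD i ' '))

lemma map_snd_zipWith : ∀ (A : List Char) (B : List Nat), B.length ≤ A.length →
    (List.zipWith Prod.mk A B).map Prod.snd = B := by
  intro A
  induction A with
  | nil =>
    intro B h
    have : B = [] := List.length_eq_zero_iff.mp (Nat.le_zero.mp h)
    subst this; rfl
  | cons a A ih =>
    intro B h
    cases B with
    | nil => rfl
    | cons b B => simp only [List.zipWith_cons_cons, List.map_cons]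
                  rw [ih B (by simpa using h)]

lemma zipWithE_len (dst : Nat) (ks : List Nat) (h : ks.length = dst) (h4 : dst ≤ 4) :
    (List.zipWith Prod.mk (pvVowels.take dst) ks).length = dst := by
  simp [pvVowels, h]
  omega

lemma pv_ne_a (j : Nat) (hj : j < pvVowels.length) (h1 : 1 ≤ j) : pvVowels[j] ≠ 'a' := by
  rw [← List.getD_eq_getElem pvVowels ' ' hj]
  have h5 : j < 5 := by simpa [pvVowels] using hj
  interval_cases j <;> simp [pvVowels]

-- dropping a pending streak S from the front of the window scan when the
-- next run (c, kk) breaks it (lbsRank c < prev)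
lemma drop_S (S : List (Char × Nat)) (len dst : Nat) (prev : Int) (ans : Nat)
    (hInv : lbsInvS S len dst prev ans) (c : Char) (kk : Nat) (L : List (Char × Nat))
    (hc : lbsRank c < prev) :
    lbsWin (S ++ (c, kk) :: L) ans = lbsWin ((c, kk) :: L) ans := by
  rcases hInv with ⟨hS, -, -, -⟩ |
    ⟨ks, hS, hks, h1, h4, hlen, hprev, hl1⟩ |
    ⟨k1, k2, k3, k4, k5, hS, -, -, hlen, -, hle⟩ |
    ⟨hne, hdst, h4, hlen, hl1, hpd, hp4, hA, i, hi, hmis⟩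
  · subst hS; rfl
  · subst hS
    have hSlen := zipWithE_len dst ks hks h4
    apply winLoop_drop_mis
    · intro j hj h1j
      rw [hSlen] at hj
      have hj5 : j < 5 := by omega
      have : (List.zipWith Prod.mk (pvVowels.take dst) ks)[j]'(by rw [hSlen]; omega)
          = ((pvVowels.take dst)[j]'(by simp [pvVowels]; omega), ks[j]'(by omega)) := by
        simp [List.getElem_zipWith]
      rw [this]
      simp only [List.getElem_take]
      exact pv_ne_a j (by simp [pvVowels]; omega) h1j
    · refine ⟨dst, by omega, ?_⟩
      intro x hx
      rw [List.getElem?_append_right (by omega : (List.zipWith Prod.mk (pvVowels.take dst) ks).length ≤ dst)] at hx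
      rw [hSlen, Nat.sub_self] at hx
      simp only [List.getElem?_cons_zero] at hx
      injection hx with hx
      subst hx
      intro h
      have := (vowelAt_iff c dst h4).mp h
      omega
  · subst hS
    rw [List.cons_append] at *
    exact winLoop_gdrop k1 k2 k3 k4 k5 ((c,kk) :: L) ans (by omega)
  · apply winLoop_drop_mis
    · exact hA
    · refine ⟨i, by omega, ?_⟩
      intro x hx
      rw [List.getElem?_append_left hi, List.getElem?_eq_getElem hi] at hx
      injection hx with hx
      subst hx
      exact hmis

lemma winLoop_inv_base (S : List (Char × Nat)) (len dst : Nat) (prev : Int) (ans : Nat)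
    (h : lbsInvS S len dst prev ans) : lbsWin S ans = ans := by
  rcases h with ⟨hS, -, -, -⟩ |
    ⟨ks, hS, hks, h1, h4, hlen, -, -⟩ |
    ⟨k1, k2, k3, k4, k5, hS, -, -, hlen, -, hle⟩ |
    ⟨-, hdst, h4, -, -, -, -, -, -⟩
  · subst hS; rfl
  · subst hS; exact winLoop_short _ _ (by rw [zipWithE_len dst ks hks h4]; omega)
  · subst hS
    have := winLoop_gdrop k1 k2 k3 k4 k5 [] ans (by omega)
    simpa using this
  · exact winLoop_short _ _ (by omega)

lemma bridge : ∀ (n : Nat) (l : List Char), l.length ≤ n →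
    ∀ (S : List (Char × Nat)) (ans len dst : Nat) (prev : Int),
    lbsInvS S len dst prev ans →
    (∀ d, l.head? = some d → 0 ≤ lbsRank d → lbsRank d ≠ prev) →
    midLoop l ans len dst prev = lbsWin (S ++ lbsRle l) ans := by
  intro n
  induction n with
  | zero =>
    intro l hl S ans len dst prev hInv _
    have hnil : l = [] := List.length_eq_zero_iff.mp (Nat.le_zero.mp hl)
    subst hnil
    show ans = lbsWin (S ++ lbsRle []) ans
    rw [show lbsRle [] = [] from by simp [lbsRle], List.append_nil]
    exact (winLoop_inv_base S len dst prev ans hInv).symm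
  | succ n ih =>
    intro l hl S ans len dst prev hInv hHp
    cases l with
    | nil =>
      show ans = lbsWin (S ++ lbsRle []) ans
      rw [show lbsRle [] = [] from by simp [lbsRle], List.append_nil]
      exact (winLoop_inv_base S len dst prev ans hInv).symm
    | cons c rest =>
      have hk := takeWhile_eq_replicate c rest
      have hsplit : rest = List.replicate (rest.takeWhile (· == c)).length c
          ++ rest.dropWhile (· == c) := by
        conv_lhs => rw [← List.takeWhile_append_dropWhile (p := (· == c)) (l := rest), hk]
      have hlen' : (rest.dropWhile (· == c)).length ≤ n := by
        have := List.length_dropWhile_le (· == c) rest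
        simp only [List.length_cons] at hl
        omega
      have hHp' : ∀ d, (rest.dropWhile (· == c)).head? = some d →
          0 ≤ lbsRank d → lbsRank d ≠ lbsRank c := by
        intro d hd h0 heq
        exact dropWhile_head_ne c rest d hd (rank_inj d c h0 heq)
      have hrr := lbsRank_range c
      rw [lbsRle_cons]
      have hmid : midLoop (c :: rest) ans len dst prev
          = midLoop (c :: (List.replicate (rest.takeWhile (· == c)).length c
              ++ rest.dropWhile (· == c))) ans len dst prev := by
        conv_lhs => rw [hsplit]
      rw [hmid, midLoop_cons]
      by_cases hv : lbsRank c < 0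
      · -- a run of non-vowels: both sides reset / are skipped
        rw [if_pos hv]
        have hrep : midLoop (List.replicate (rest.takeWhile (· == c)).length c
              ++ rest.dropWhile (· == c)) ans 0 0 (lbsRank c)
            = midLoop (rest.dropWhile (· == c)) ans 0 0 (lbsRank c) := by
          rcases Nat.eq_zero_or_eq_succ_pred (rest.takeWhile (· == c)).length with h0 | hsuc
          · rw [h0]; rfl
          · rw [hsuc]; exact midLoop_rep_nv c hv _ _ _ _ _ _
        rw [hrep, ih _ hlen' [] ans 0 0 (lbsRank c)
              (Or.inl ⟨rfl, rfl, rfl, rank_neg_eq c hv⟩)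
              (fun d hd h0 => by rw [rank_neg_eq c hv]; omega)]
        rw [List.nil_append]
        have hdropS : lbsWin (S ++ (c, (rest.takeWhile (· == c)).length + 1)
              :: lbsRle (rest.dropWhile (· == c))) ans
            = lbsWin ((c, (rest.takeWhile (· == c)).length + 1)
              :: lbsRle (rest.dropWhile (· == c))) ans := by
          rcases hInv with ⟨hS, -, -, -⟩ | hE | hG | hF
          · subst hS; rfl
          · refine drop_S S len dst prev ans (Or.inr (Or.inl hE)) c _ _ ?_
            obtain ⟨-, -, -, h1d, -, -, hp, -⟩ := hE
            omega
          · refine drop_S S len dst prev ans (Or.inr (Or.inr (Or.inl hG))) c _ _ ?_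
            obtain ⟨-, -, -, -, -, -, -, hp, -⟩ := hG
            omega
          · refine drop_S S len dst prev ans (Or.inr (Or.inr (Or.inr hF))) c _ _ ?_
            obtain ⟨hne, hdst, -, -, -, hpd, -⟩ := hF
            have := List.length_pos_of_ne_nil hne
            omega
        rw [hdropS]
        refine (winLoop_drop_notA [(c, (rest.takeWhile (· == c)).length + 1)] _ ans ?_).symm
        intro p hp
        fin_cases hp
        intro h
        have := (rank0_iff c).mp h
        omega
      · have h0 : 0 ≤ lbsRank c := by omega
        have hne : lbsRank c ≠ prev := hHp c rfl h0
        rw [if_neg hv]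
        by_cases hb : len = 0 ∨ lbsRank c < prev
        · -- start of a new streak [(c, k+1)]
          rw [if_pos hb]
          rw [midLoop_rep c h0 _ _ ans 1 1 (le_refl 1) (by omega), if_neg (by omega)]
          have hInv' : lbsInvS [(c, (rest.takeWhile (· == c)).length + 1)]
              (1 + (rest.takeWhile (· == c)).length) 1 (lbsRank c) ans := by
            by_cases hz : lbsRank c = 0
            · have hca : c = 'a' := (rank0_iff c).mpr hz
              refine Or.inr (Or.inl ⟨[(rest.takeWhile (· == c)).length + 1],
                by rw [hca]; rfl, rfl, by omega, by omega, by simp; omega,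
                by rw [hz]; rfl, by omega⟩)
            · refine Or.inr (Or.inr (Or.inr ⟨by simp, by simp, by omega,
                by simp; omega, by omega, by omega, by omega, ?_, ⟨0, by simp, ?_⟩⟩))
              · intro j hj h1j; simp at hj; omega
              · show c ≠ pvVowels.getD 0 ' '
                exact fun h => hz ((rank0_iff c).mp h)
          rw [ih _ hlen' _ ans _ 1 (lbsRank c) hInv' hHp']
          rw [List.cons_append, List.nil_append]
          have hdropS : lbsWin (S ++ (c, (rest.takeWhile (· == c)).length + 1)
                :: lbsRle (rest.dropWhile (· == c))) ans
              = lbsWin ((c, (rest.takeWhile (· == c)).length + 1)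
                :: lbsRle (rest.dropWhile (· == c))) ans := by
            rcases hb with hb0 | hblt
            · rcases hInv with ⟨hS, -, -, -⟩ | ⟨-, -, -, -, -, -, -, h1⟩ |
                ⟨-, -, -, -, -, hS, -, -, -, h1, -⟩ | ⟨-, -, -, -, h1, -⟩
              · subst hS; rfl
              all_goals omega
            · exact drop_S S len dst prev ans hInv c _ _ hblt
          exact hdropS.symm
        · -- the streak extends with the run (c, k+1)
          rw [if_neg hb, if_neg hne]
          rw [not_or, not_lt] at hb
          obtain ⟨hlen0, hge⟩ := hb
          have hgt : prev < lbsRank c := lt_of_le_of_ne hge (Ne.symm hne)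
          rcases hInv with ⟨-, hl0, -, -⟩ |
            ⟨ks, hS, hks, h1d, h4d, hsum, hprev, hl1⟩ |
            ⟨k1, k2, k3, k4, k5, hS, hdst5, hprev, hsum, hl1, hle⟩ |
            ⟨hneS, hdst, h4d, hsum, hl1, hpd, hp4, hA, i, hi, hmis⟩
          · omega
          · -- from the exact-prefix state (E)
            subst hS
            have hrge : (dst : Int) ≤ lbsRank c := by omega
            by_cases hrd : lbsRank c = (dst : Int)
            · by_cases hd5 : dst + 1 = 5
              · -- the streak completes: c = 'u', dst = 4
                have hdst4 : dst = 4 := by omega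
                subst hdst4
                obtain ⟨m1, m2, m3, m4, hksE⟩ :
                    ∃ m1 m2 m3 m4, ks = [m1, m2, m3, m4] := by
                  rcases ks with _|⟨m1,_|⟨m2,_|⟨m3,_|⟨m4,_|⟨m5,t⟩⟩⟩⟩⟩ <;>
                    first | exact ⟨_,_,_,_, rfl⟩ | (exfalso; simp at hks)
                subst hksE
                have hcu : c = 'u' := by
                  have := (vowelAt_iff c 4 (by omega)).mpr (by exact_mod_cast hrd)
                  simpa [pvVowels] using this
                subst hcu
                rw [if_pos hd5]
                rw [midLoop_rep 'u' h0 _ _ _ (len + 1) 5 (by omega)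
                      (fun _ => le_max_right _ _), if_pos rfl]
                rw [ih _ hlen'
                      [('a',m1),('e',m2),('i',m3),('o',m4),('u',(rest.takeWhile (· == 'u')).length + 1)]
                      _ (len + 1 + (rest.takeWhile (· == 'u')).length) 5 (lbsRank 'u')
                      (Or.inr (Or.inr (Or.inl ⟨m1, m2, m3, m4, _, rfl, rfl, by decide,
                        by simp at hsum; omega, by omega, le_max_right _ _⟩)))
                      hHp']
                have hSeq : (List.zipWith Prod.mk (pvVowels.take 4) [m1,m2,m3,m4])
                      ++ ('u', (rest.takeWhile (· == 'u')).length + 1)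
                        :: lbsRle (rest.dropWhile (· == 'u'))
                    = [('a',m1),('e',m2),('i',m3),('o',m4),('u',(rest.takeWhile (· == 'u')).length + 1)]
                      ++ lbsRle (rest.dropWhile (· == 'u')) := by
                  simp [pvVowels]
                have hms : max (max ans (len + 1)) (len + 1 + (rest.takeWhile (· == 'u')).length)
                    = max ans (m1 + m2 + m3 + m4 + ((rest.takeWhile (· == 'u')).length + 1)) := by
                  simp at hsum; omega
                rw [hSeq, hms]
                exact winLoop_absorb m1 m2 m3 m4 ((rest.takeWhile (· == 'u')).length + 1)
                  (lbsRle (rest.dropWhile (· == 'u'))) ans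
              · -- the exact prefix grows: dst' = dst + 1 ≤ 4
                rw [if_neg hd5]
                rw [midLoop_rep c h0 _ _ _ (len + 1) (dst + 1) (by omega)
                      (fun h => absurd h hd5), if_neg hd5]
                have hcv : c = pvVowels[dst]'(by simp [pvVowels]; omega) := by
                  have := (vowelAt_iff c dst (by omega)).mpr (by exact_mod_cast hrd)
                  rw [this]
                  simp [List.getD, List.getElem?_eq_getElem (by simp [pvVowels]; omega : dst < pvVowels.length)]
                have hSapp : (List.zipWith Prod.mk (pvVowels.take dst) ks)
                      ++ [(c, (rest.takeWhile (· == c)).length + 1)]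
                    = List.zipWith Prod.mk (pvVowels.take (dst + 1))
                        (ks ++ [(rest.takeWhile (· == c)).length + 1]) := by
                  rw [List.take_add_one, List.getElem?_eq_getElem (by simp [pvVowels]; omega : dst < pvVowels.length)]
                  rw [List.zipWith_append (by simp [pvVowels]; omega)]
                  simp [← hcv]
                have hInvE : lbsInvS (List.zipWith Prod.mk (pvVowels.take dst) ks
                      ++ [(c, (rest.takeWhile (· == c)).length + 1)])
                    (len + 1 + (rest.takeWhile (· == c)).length) (dst + 1) (lbsRank c) ans := by
                  refine Or.inr (Or.inl ⟨ks ++ [(rest.takeWhile (· == c)).length + 1],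
                    hSapp, by simp [hks], by omega, by omega,
                    by simp [hsum, List.sum_append]; omega, by push_cast; omega, by omega⟩)
                rw [ih _ hlen' _ ans _ (dst + 1) (lbsRank c) hInvE hHp']
                rw [List.append_assoc]
                rfl
            · -- a vowel skipped ahead: the streak goes dead (F)
              have hr1 : (dst : Int) + 1 ≤ lbsRank c := by omega
              have hd5 : ¬ dst + 1 = 5 := by omega
              rw [if_neg hd5]
              rw [midLoop_rep c h0 _ _ _ (len + 1) (dst + 1) (by omega)
                    (fun h => absurd h hd5), if_neg hd5]
              have hSlen := zipWithE_len dst ks hks h4d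
              have hInvF : lbsInvS (List.zipWith Prod.mk (pvVowels.take dst) ks
                    ++ [(c, (rest.takeWhile (· == c)).length + 1)])
                  (len + 1 + (rest.takeWhile (· == c)).length) (dst + 1) (lbsRank c) ans := by
                refine Or.inr (Or.inr (Or.inr ⟨by simp, by simp [hSlen],
                  by omega, ?_, by omega, by push_cast; omega, by omega, ?_, ?_⟩))
                · rw [List.map_append, List.sum_append,
                      map_snd_zipWith _ _ (by simp [pvVowels]; omega)]
                  simp [hsum]
                  omega
                · intro j hj h1j
                  simp only [List.length_append, hSlen, List.length_cons, List.length_nil] at hj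
                  by_cases hjd : j < dst
                  · rw [List.getElem_append_left (by rw [hSlen]; omega)]
                    have : (List.zipWith Prod.mk (pvVowels.take dst) ks)[j]'(by rw [hSlen]; omega)
                        = ((pvVowels.take dst)[j]'(by simp [pvVowels]; omega), ks[j]'(by omega)) := by
                      simp [List.getElem_zipWith]
                    rw [this]
                    simp only [List.getElem_take]
                    exact pv_ne_a j (by simp [pvVowels]; omega) h1j
                  · have hjd' : j = dst := by omega
                    subst hjd'
                    rw [List.getElem_append_right hSlen.le]
                    simp only [hSlen, Nat.sub_self, List.getElem_cons_zero]
                    exact fun h => by have := (rank0_iff c).mp h; omega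
                · refine ⟨dst, ⟨by simp [hSlen], ?_⟩⟩
                  rw [List.getElem_append_right hSlen.le]
                  simp only [hSlen, Nat.sub_self, List.getElem_cons_zero]
                  intro h
                  have := (vowelAt_iff c dst (by omega)).mp h
                  omega
              rw [ih _ hlen' _ ans _ (dst + 1) (lbsRank c) hInvF hHp']
              rw [List.append_assoc]
              rfl
          · -- from the complete state (G): impossible, rank ≤ 4 = prev
            omega
          · -- dead streak extends and stays dead
            have hr1 : (dst : Int) + 1 ≤ lbsRank c := by omega
            have hd5 : ¬ dst + 1 = 5 := by omega
            rw [if_neg hd5]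
            rw [midLoop_rep c h0 _ _ _ (len + 1) (dst + 1) (by omega)
                  (fun h => absurd h hd5), if_neg hd5]
            have hInvF : lbsInvS (S ++ [(c, (rest.takeWhile (· == c)).length + 1)])
                (len + 1 + (rest.takeWhile (· == c)).length) (dst + 1) (lbsRank c) ans := by
              refine Or.inr (Or.inr (Or.inr ⟨by simp, by simp [← hdst],
                by omega, ?_, by omega, by push_cast; omega, by omega, ?_, ?_⟩))
              · simp [hsum]
                omega
              · intro j hj h1j
                simp only [List.length_append, List.length_cons, List.length_nil] at hj
                by_cases hjd : j < S.length
                · rw [List.getElem_append_left hjd]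
                  exact hA j hjd h1j
                · have hjd' : j = S.length := by omega
                  subst hjd'
                  rw [List.getElem_append_right (le_refl _)]
                  simp only [Nat.sub_self, List.getElem_cons_zero]
                  exact fun h => by have := (rank0_iff c).mp h; omega
              · refine ⟨i, ⟨by simp; omega, ?_⟩⟩
                rw [List.getElem_append_left hi]
                exact hmis
            rw [ih _ hlen' _ ans _ (dst + 1) (lbsRank c) hInvF hHp']
            rw [List.append_assoc]
            rfl

-- ===== VERDICT (by name: the statement is the Claim_ definition above) =====
theorem longestBeautifulSubstring_spec : Claim_equal_longestBeautifulSubstring := by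
  unfold Claim_equal_longestBeautifulSubstring
  intro word _
  unfold Spec_longestBeautifulSubstring longestBeautifulSubstring_alt
  rw [A_eq_mid]
  congr 1
  have h := bridge word.toList.length word.toList le_rfl [] 0 0 0 (-1)
    (Or.inl ⟨rfl, rfl, rfl, rfl⟩)
    (fun d _ h0 => by omega)
  simpa using h
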